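-- pv_equiv track=rewrite | github.com/JamesAndrewJackson/PopulationGrowth_CodeChallenge | codeTest.py | integratePop
-- ===== SOURCE A (Python) =====
-- def integratePop(popChange):
--     bestPop = 0
--     bestYear = 0
--     curPop = 0
--     for i in range(len(popChange)):
--         curPop += popChange[i]
--         if (curPop > bestPop):
--             bestPop = curPop
--             bestYear = i
--     return bestYear
-- ===== SOURCE B (Python) =====
-- def integratePop(popChange):
--     prefixes = []
--     total = 0
--     for x in popChange:
--         total += x
--         prefixes.append(total)
--     if not prefixes:
--         return 0
--     m = max(prefixes)
--     return prefixes.index(m) if m > 0 else 0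
-- ===== Notes on version B (the rewrite author's own statement) =====
-- stated objective: simpler
-- what changed: B builds the full prefix-sum table once and then answers with two library scans (max, then first index of the max), instead of A's single online pass tracking running sum, best value and best year together.
import Mathlib
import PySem

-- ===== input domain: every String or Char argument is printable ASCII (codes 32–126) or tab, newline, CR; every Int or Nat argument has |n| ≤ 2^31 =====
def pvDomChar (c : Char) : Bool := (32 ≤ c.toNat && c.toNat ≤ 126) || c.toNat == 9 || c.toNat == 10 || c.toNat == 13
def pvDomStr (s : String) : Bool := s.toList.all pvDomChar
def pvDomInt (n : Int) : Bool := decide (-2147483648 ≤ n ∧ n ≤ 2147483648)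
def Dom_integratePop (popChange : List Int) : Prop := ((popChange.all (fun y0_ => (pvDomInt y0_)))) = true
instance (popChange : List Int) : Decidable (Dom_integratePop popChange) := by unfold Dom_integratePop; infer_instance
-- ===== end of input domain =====

-- B builds the prefix-sum table once and answers with two library scans (max, first index
-- of the max) instead of A's single online pass tracking running sum/best/best-year (simpler).

-- ===== PORT A =====
-- state (bestPop, bestYear, curPop); loop over range(len(popChange)) with popChange[i]
def integratePop (popChange : List Int) : Int :=
  let st := (PySem.List.pyRange 0 (PySem.List.len popChange) 1).foldl
    (fun (s : Int × Int × Int) (i : Int) =>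
      let curPop := s.2.2 + PySem.List.pyGetD popChange i 0
      if curPop > s.1 then (curPop, i, curPop) else (s.1, s.2.1, curPop))
    (0, 0, 0)
  st.2.1

-- ===== PORT B =====
-- the prefix-building loop of Source B (total accumulator, appending each running total)
def pvPrefixes (total : Int) : List Int → List Int
  | [] => []
  | x :: xs => (total + x) :: pvPrefixes (total + x) xs

def integratePop_alt (popChange : List Int) : Int :=
  let prefixes := pvPrefixes 0 popChange
  match PySem.List.max? prefixes (fun y => y) with
  | none => 0    -- "if not prefixes: return 0" (max on [] would raise)
  | some m => if m > 0 then (((PySem.List.index? prefixes m).getD 0 : Nat) : Int) else 0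

-- ===== PRECONDITION & SPEC =====
def Spec_integratePop (popChange : List Int) (out : Int) : Prop := out = integratePop_alt popChange
instance (popChange : List Int) (out : Int) : Decidable (Spec_integratePop popChange out) := by unfold Spec_integratePop; infer_instance

-- ===== CLAIM (what is proved, stated in full; the proofs are below) =====
def Claim_equal_integratePop : Prop := ∀ (popChange : List Int), Dom_integratePop popChange → Spec_integratePop popChange (integratePop popChange)

-- ===== LEMMAS AND PROOFS =====

-- A's loop, written structurally over the list with an explicit index counter
def loopA : List Int → Int → Int × Int × Int → Int × Int × Int
  | [], _, s => s
  | x :: xs, i, s =>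
    let c' := s.2.2 + x
    if c' > s.1 then loopA xs (i + 1) (c', i, c') else loopA xs (i + 1) (s.1, s.2.1, c')

lemma foldl_max_mem (t : List Int) (a : Int) :
    List.foldl max a t = a ∨ List.foldl max a t ∈ t := by
  induction t generalizing a with
  | nil => simp
  | cons x t ih =>
    simp only [List.foldl_cons]
    rcases ih (max a x) with h | h
    · rcases le_total a x with hx | hx
      · right
        rw [h, max_eq_right hx]
        exact List.mem_cons_self
      · left
        rw [h, max_eq_left hx]
    · right
      exact List.mem_cons_of_mem _ h

lemma foldl_max_max (t : List Int) (a b : Int) :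
    List.foldl max (max a b) t = max a (List.foldl max b t) := by
  induction t generalizing b with
  | nil => simp
  | cons x t ih => simp only [List.foldl_cons]; rw [max_assoc, ih]

-- bridge: the pyRange/pyGetD fold is loopA on the dropped suffix
lemma foldA_eq_loopA (full : List Int) :
    ∀ (ys : List Int) (i : Nat) (s : Int × Int × Int), full.drop i = ys →
    (PySem.List.pyRange (i : Int) (PySem.List.len full) 1).foldl
      (fun (s : Int × Int × Int) (j : Int) =>
        let curPop := s.2.2 + PySem.List.pyGetD full j 0
        if curPop > s.1 then (curPop, j, curPop) else (s.1, s.2.1, curPop)) s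
      = loopA ys (i : Int) s := by
  intro ys
  induction ys with
  | nil =>
    intro i s h
    have hlen : full.length ≤ i := List.drop_eq_nil_iff.mp h
    rw [PySem.List.pyRange_one_eq_nil (by simp; omega)]
    simp [loopA]
  | cons y ys ih =>
    intro i s h
    have hi : i < full.length := by
      by_contra hc
      have hnil : full.drop i = [] := List.drop_eq_nil_iff.mpr (by omega)
      rw [hnil] at h
      cases h
    have h9 : full[i]? = some y := by
      have h0 := List.getElem?_drop (xs := full) (i := i) (j := 0)
      rw [h] at h0
      simpa using h0.symm
    have hget : PySem.List.pyGetD full (i : Int) 0 = y := by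
      rw [PySem.List.pyGetD_of_nonneg full 0 (by positivity)]
      simp [List.getD_eq_getElem?_getD, h9]
    have hdrop : full.drop (i + 1) = ys := by
      have h1 := congrArg (List.drop 1) h
      simpa [List.drop_drop, Nat.add_comm] using h1
    rw [PySem.List.pyRange_one_cons (by simp; omega)]
    simp only [List.foldl_cons, hget]
    have hcast : ((i : Int) + 1) = ((i + 1 : Nat) : Int) := by push_cast; ring
    have hB : loopA (y :: ys) (i : Int) s =
        if s.2.2 + y > s.1 then loopA ys ((i : Int) + 1) (s.2.2 + y, (i : Int), s.2.2 + y)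
        else loopA ys ((i : Int) + 1) (s.1, s.2.1, s.2.2 + y) := rfl
    rw [hB, hcast]
    by_cases hc : s.2.2 + y > s.1
    · simp only [if_pos hc]
      exact ih (i + 1) _ hdrop
    · simp only [if_neg hc]
      exact ih (i + 1) _ hdrop

-- characterization of loopA by the prefix-sum table
lemma loopA_spec (xs : List Int) :
    ∀ (i b y c : Int),
    loopA xs i (b, y, c) =
      (List.foldl max b (pvPrefixes c xs),
       if List.foldl max b (pvPrefixes c xs) > b
       then i + (((PySem.List.index? (pvPrefixes c xs)
              (List.foldl max b (pvPrefixes c xs))).getD 0 : Nat) : Int)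
       else y,
       c + xs.sum) := by
  induction xs with
  | nil => intro i b y c; simp [loopA, pvPrefixes]
  | cons x xs ih =>
    intro i b y c
    simp only [loopA, pvPrefixes, List.foldl_cons, List.sum_cons]
    by_cases h : c + x > b
    · rw [if_pos h, ih, max_eq_right (le_of_lt h)]
      set M := List.foldl max (c + x) (pvPrefixes (c + x) xs) with hM
      have hpM : (c + x) ≤ M := (PySem.List.le_foldl_max _ _).1
      simp only [if_pos (lt_of_lt_of_le h hpM), Prod.mk.injEq]
      refine ⟨trivial, ?_, by ring⟩
      by_cases hMp : M > (c + x)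
      · rw [if_pos hMp, PySem.List.index?_cons_of_ne _ (ne_of_lt hMp)]
        have hmem : M ∈ pvPrefixes (c + x) xs := by
          rcases foldl_max_mem (pvPrefixes (c + x) xs) (c + x) with h' | h'
          · rw [← hM] at h'; omega
          · rw [← hM] at h'; exact h'
        cases hk : PySem.List.index? (pvPrefixes (c + x) xs) M with
        | none => exact absurd ((PySem.List.index?_eq_none_iff _ _).mp hk) (by simpa using hmem)
        | some k =>
          simp only [Option.map_some, Option.getD_some]
          push_cast
          omega
      · rw [if_neg hMp]
        have hMe : M = c + x := le_antisymm (by omega) hpM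
        rw [hMe, PySem.List.index?_cons_self]
        simp
    · rw [if_neg h, ih, max_eq_left (by omega)]
      set M := List.foldl max b (pvPrefixes (c + x) xs) with hM
      simp only [Prod.mk.injEq]
      refine ⟨trivial, ?_, by ring⟩
      by_cases hMb : M > b
      · simp only [if_pos hMb]
        rw [PySem.List.index?_cons_of_ne _ (by omega : c + x ≠ M)]
        have hmem : M ∈ pvPrefixes (c + x) xs := by
          rcases foldl_max_mem (pvPrefixes (c + x) xs) b with h' | h'
          · rw [← hM] at h'; omega
          · rw [← hM] at h'; exact h'
        cases hk : PySem.List.index? (pvPrefixes (c + x) xs) M with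
        | none => exact absurd ((PySem.List.index?_eq_none_iff _ _).mp hk) (by simpa using hmem)
        | some k =>
          simp only [Option.map_some, Option.getD_some]
          push_cast
          omega
      · simp only [if_neg hMb]

-- ===== VERDICT (by name: the statement is the Claim_ definition above) =====
theorem integratePop_spec : Claim_equal_integratePop := by
  intro xs _
  unfold Spec_integratePop integratePop integratePop_alt
  have hb := foldA_eq_loopA xs xs 0 (0, 0, 0) (by simp)
  simp only [Nat.cast_zero] at hb
  rw [hb, loopA_spec]
  cases xs with
  | nil => simp [pvPrefixes, PySem.List.max?]
  | cons x t =>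
    simp only [pvPrefixes, zero_add, List.foldl_cons]
    rw [PySem.List.max?_id_cons]
    have hfold : List.foldl max (max 0 x) (pvPrefixes x t) =
        max 0 (List.foldl max x (pvPrefixes x t)) := foldl_max_max (pvPrefixes x t) 0 x
    by_cases hpos : List.foldl max x (pvPrefixes x t) > 0
    · rw [hfold, max_eq_right (le_of_lt hpos)]
    · rw [hfold, max_eq_left (by omega)]
      simp [hpos]
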